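-- pv_equiv track=rewrite | github.com/delightonyedikachipixel/Home_snack | length_of_list.py | multiply_elements_at_third_position
-- ===== SOURCE A (Python) =====
-- def multiply_elements_at_third_position(numbers):
--
--     product = 1
--     counter = 1
--
--     for value in numbers:
--         if counter % 3 == 0:
--             product *= value
--         counter +=1
--
--     return product
-- ===== SOURCE B (Python) =====
-- from math import prod
--
-- def multiply_elements_at_third_position(numbers):
--     return prod(numbers[2::3])
-- ===== Notes on version B (the rewrite author's own statement) =====
-- stated objective: simpler
-- what changed: Replaces the counter-and-modulo loop by taking the stride-3 slice numbers[2::3] and returning its product via math.prod.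
import Mathlib
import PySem

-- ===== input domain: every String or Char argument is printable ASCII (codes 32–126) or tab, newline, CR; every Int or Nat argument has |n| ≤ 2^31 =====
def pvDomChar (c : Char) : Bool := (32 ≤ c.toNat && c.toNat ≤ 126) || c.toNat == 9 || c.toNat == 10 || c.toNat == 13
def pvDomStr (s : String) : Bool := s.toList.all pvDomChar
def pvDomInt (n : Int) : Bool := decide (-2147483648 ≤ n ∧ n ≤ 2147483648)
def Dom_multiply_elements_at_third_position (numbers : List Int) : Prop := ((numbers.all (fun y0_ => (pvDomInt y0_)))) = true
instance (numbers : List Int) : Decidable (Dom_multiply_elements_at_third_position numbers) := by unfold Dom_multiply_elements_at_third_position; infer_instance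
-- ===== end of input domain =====

-- ===== PORT A =====
def multiply_elements_at_third_position (numbers : List Int) : Int :=
  (numbers.foldl (fun st value =>
      ((if PySem.Int.mod st.2 3 == 0 then st.1 * value else st.1), st.2 + 1))
    ((1 : Int), (1 : Int))).1

-- ===== PORT B =====
-- numbers[2::3]: every third element starting at index 2 (hand port of the stride-3 slice; exact)
def pvEvery3 : List Int → List Int
  | _ :: _ :: c :: rest => c :: pvEvery3 rest
  | _ => []

-- math.prod = left fold of (*) with initial value 1 (exact)
def multiply_elements_at_third_position_alt (numbers : List Int) : Int :=
  (pvEvery3 numbers).foldl (· * ·) 1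

-- ===== PRECONDITION & SPEC =====
def Spec_multiply_elements_at_third_position (numbers : List Int) (out : Int) : Prop := out = multiply_elements_at_third_position_alt numbers
instance (numbers : List Int) (out : Int) : Decidable (Spec_multiply_elements_at_third_position numbers out) := by unfold Spec_multiply_elements_at_third_position; infer_instance

-- ===== CLAIM (what is proved, stated in full; the proofs are below) =====
def Claim_equal_multiply_elements_at_third_position : Prop := ∀ (numbers : List Int), Dom_multiply_elements_at_third_position numbers → Spec_multiply_elements_at_third_position numbers (multiply_elements_at_third_position numbers)

-- ===== LEMMAS AND PROOFS =====

lemma loop3 (xs : List Int) (p c : Int) (h : c % 3 = 1) :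
    (xs.foldl (fun st value =>
      ((if PySem.Int.mod st.2 3 == 0 then st.1 * value else st.1), st.2 + 1)) (p, c)).1
      = (pvEvery3 xs).foldl (· * ·) p := by
  have hm : ∀ d : Int, PySem.Int.mod d 3 = d % 3 :=
    fun d => PySem.Int.mod_eq_emod_of_pos (by omega)
  induction xs using pvEvery3.induct generalizing p c with
  | case1 a b v rest ih =>
    have e1 : (c % 3 == 0) = false := by simp; omega
    have e2 : ((c+1) % 3 == 0) = false := by simp; omega
    have e3 : ((c+1+1) % 3 == 0) = true := by simp; omega
    simp only [List.foldl, pvEvery3, hm]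
    rw [e1, e2, e3]
    simp only [Bool.false_eq_true, if_neg (fun h => h : ¬(False))]
    simpa using ih (p * v) (c+1+1+1) (by omega)
  | case2 xs hne =>
    rcases xs with _ | ⟨a, _ | ⟨b, _ | ⟨v, rest⟩⟩⟩
    · simp [pvEvery3]
    · have e1 : (c % 3 == 0) = false := by simp; omega
      simp only [List.foldl, pvEvery3, hm]
      rw [e1]
      simp
    · have e1 : (c % 3 == 0) = false := by simp; omega
      have e2 : ((c+1) % 3 == 0) = false := by simp; omega
      simp only [List.foldl, pvEvery3, hm]
      rw [e1, e2]
      simp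
    · exact absurd rfl (hne a b v rest)

-- ===== VERDICT (by name: the statement is the Claim_ definition above) =====
theorem multiply_elements_at_third_position_spec : Claim_equal_multiply_elements_at_third_position := by
  intro numbers _
  unfold Spec_multiply_elements_at_third_position multiply_elements_at_third_position
    multiply_elements_at_third_position_alt
  exact loop3 numbers 1 1 (by decide)
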